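-- pv_equiv track=rewrite | github.com/Bhushan-Aditya/PDF---Reader | Challenge_1a/ocr_adaptive_processor.py | is_title_candidate_dynamic
-- ===== SOURCE A (Python) =====
-- def is_title_candidate_dynamic(line: str, line_index: int) -> bool:
--     """Truly dynamic strategy to determine if line is a title candidate."""
--     if not line or len(line) < 5:
--         return False
--
--     # Truly dynamic strategy: Length constraints
--     if len(line) > 500:  # Too long for a title
--         return False
--
--     # Truly dynamic strategy: Word count constraints
--     word_count = len(line.split())
--     if word_count > 50:  # Too many words for a title
--         return False
--
--     # Truly dynamic strategy: Dynamic title indicators based on common patterns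
--     title_indicators = [
--         'overview', 'introduction', 'summary', 'background', 'purpose',
--         'objectives', 'goals', 'scope', 'methodology', 'approach',
--         'strategy', 'implementation', 'evaluation', 'assessment',
--         'analysis', 'findings', 'conclusions', 'recommendations',
--         'proposal', 'request', 'application', 'form', 'grant',
--         'foundation', 'level', 'extension', 'course', 'program',
--         'pathway', 'stem', 'business', 'plan', 'rfp', 'tender'
--     ]
--
--     line_lower = line.lower()
--
--     # Truly dynamic strategy: Check for title indicators
--     has_title_indicator = any(indicator in line_lower for indicator in title_indicators)
--
--     # Truly dynamic strategy: Formatting indicators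
--     starts_with_capital = line[0].isupper() if line else False
--     not_ends_with_period = not line.endswith('.')
--     not_numbered = not any(char.isdigit() for char in line[:5])
--
--     # Truly dynamic strategy: All caps detection (common for titles)
--     is_all_caps = line.isupper() and len(line) > 10
--
--     # Truly dynamic strategy: Position-based scoring
--     position_score = 1.0 if line_index < 5 else 0.8 if line_index < 10 else 0.5 if line_index < 15 else 0.2
--
--     # Truly dynamic strategy: Combine indicators with weights
--     score = 0.0
--     if has_title_indicator:
--         score += 0.6
--     if starts_with_capital and not_ends_with_period and not_numbered:
--         score += 0.5
--     if is_all_caps: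
--         score += 0.4
--     if position_score > 0.5:
--         score += 0.4
--
--     return score >= 0.7  # Dynamic threshold for better accuracy
-- ===== SOURCE B (Python) =====
-- TITLE_INDICATORS = [
--     'overview', 'introduction', 'summary', 'background', 'purpose',
--     'objectives', 'goals', 'scope', 'methodology', 'approach',
--     'strategy', 'implementation', 'evaluation', 'assessment',
--     'analysis', 'findings', 'conclusions', 'recommendations',
--     'proposal', 'request', 'application', 'form', 'grant',
--     'foundation', 'level', 'extension', 'course', 'program',
--     'pathway', 'stem', 'business', 'plan', 'rfp', 'tender'
-- ]
--
--
-- def _need(checks, k):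
--     """True iff at least k of the (lazily evaluated) checks hold.
--
--     Evaluates checks left to right and stops as soon as the verdict is
--     decided, so later checks may never be run at all.
--     """
--     if k <= 0:
--         return True
--     if len(checks) < k:
--         return False
--     if checks[0]():
--         return _need(checks[1:], k - 1)
--     return _need(checks[1:], k)
--
--
-- def _contains_indicator(low):
--     # Position-major substring scan: walk the line once and, at each
--     # position, ask whether some indicator starts right there (instead of
--     # running one full substring search per indicator).
--     return any(
--         any(low.startswith(ind, i) for ind in TITLE_INDICATORS)
--         for i in range(len(low))
--     )
--
--
-- def is_title_candidate_dynamic(line: str, line_index: int) -> bool: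
--     if len(line) < 5 or len(line) > 500 or len(line.split()) > 50:
--         return False
--     # A's weights 0.6/0.5/0.4/0.4 against threshold 0.7 mean exactly: at
--     # least two of the four signals hold (two give >= 0.8, one gives <= 0.6).
--     # A's "position_score > 0.5" resolves to line_index < 10.
--     checks = [
--         lambda: _contains_indicator(line.lower()),
--         lambda: line[0].isupper() and not line.endswith('.')
--                 and not any(c.isdigit() for c in line[:5]),
--         lambda: len(line) > 10 and line.isupper(),
--         lambda: line_index < 10,
--     ]
--     return _need(checks, 2)
-- ===== Notes on version B (the rewrite author's own statement) =====
-- stated objective: alternative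
-- what changed: B replaces A's eager weighted float score (0.6/0.5/0.4/0.4 vs threshold 0.7) with a short-circuiting recursive 'need k of these checks' combinator over lazily evaluated checks (later checks are never run once two hold or too few remain), and finds title indicators by a single position-major scan of the line (at each position, does some indicator start here?) instead of one full substring search per indicator.
import Mathlib
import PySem

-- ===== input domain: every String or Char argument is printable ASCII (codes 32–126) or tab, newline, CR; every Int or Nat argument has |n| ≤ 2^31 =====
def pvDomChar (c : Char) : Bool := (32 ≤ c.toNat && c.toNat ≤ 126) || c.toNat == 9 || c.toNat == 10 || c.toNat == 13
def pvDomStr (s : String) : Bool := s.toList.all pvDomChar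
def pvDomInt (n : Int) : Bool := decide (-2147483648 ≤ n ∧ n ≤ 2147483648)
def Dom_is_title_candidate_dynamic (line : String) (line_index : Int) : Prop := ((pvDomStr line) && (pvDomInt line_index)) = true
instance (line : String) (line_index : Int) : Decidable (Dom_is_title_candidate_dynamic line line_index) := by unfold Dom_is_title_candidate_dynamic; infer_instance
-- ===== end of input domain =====

-- B replaces A's eager weighted float score with a short-circuiting "need 2 of these checks" recursion over lazily
-- evaluated checks, and finds indicators by a position-major scan of the line instead of one substring search per
-- indicator; objective: alternative.

-- the literal indicator list from the Python source (shared data of both programs)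
def titleIndicators : List String :=
  ["overview", "introduction", "summary", "background", "purpose",
   "objectives", "goals", "scope", "methodology", "approach",
   "strategy", "implementation", "evaluation", "assessment",
   "analysis", "findings", "conclusions", "recommendations",
   "proposal", "request", "application", "form", "grant",
   "foundation", "level", "extension", "course", "program",
   "pathway", "stem", "business", "plan", "rfp", "tender"]

-- str.isupper(): at least one cased character and no lowercase one; exact on the ASCII domain
def pyStrIsupper (cs : List Char) : Bool :=
  cs.any PySem.Chars.isalpha && cs.all (fun c => !PySem.Chars.islower c)

-- line[0].isupper() if line else False
def startsCap (cs : List Char) : Bool :=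
  match cs with
  | [] => false
  | c :: _ => PySem.Chars.isupper c

-- ===== PORT A =====
def is_title_candidate_dynamic (line : String) (line_index : Int) : Bool :=
  let cs := line.toList
  if cs.length < 5 then false
  else if 500 < cs.length then false
  else if 50 < (PySem.Str.split₀ line).length then false
  else
    let line_lower := PySem.Str.lower line
    let has_title_indicator := titleIndicators.any (fun ind => PySem.Str.isIn ind line_lower)
    let starts_with_capital := startsCap cs
    let not_ends_with_period := !(PySem.Str.endswith line ".")
    let not_numbered := !((PySem.List.slice cs none (some 5)).any PySem.Chars.isdigit)
    let is_all_caps := pyStrIsupper cs && decide (10 < cs.length)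
    -- position_score in tenths of the Python floats 1.0/0.8/0.5/0.2 (exact: only compared with 0.5)
    let position_score : Int :=
      if line_index < 5 then 10 else if line_index < 10 then 8
      else if line_index < 15 then 5 else 2
    -- score in tenths of the Python floats (0.6/0.5/0.4 summed against 0.7: exact in this range)
    let score : Int := 0
    let score := if has_title_indicator then score + 6 else score
    let score := if starts_with_capital && (not_ends_with_period && not_numbered) then score + 5 else score
    let score := if is_all_caps then score + 4 else score
    let score := if 5 < position_score then score + 4 else score
    decide (7 ≤ score)

-- ===== PORT B =====
-- Source B's _need: at least k of the lazily evaluated checks hold, stopping as soon as the verdict is decided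
def needCount : List (Unit → Bool) → Int → Bool
  | [], k => if k ≤ 0 then true else false
  | c :: rest, k =>
    if k ≤ 0 then true
    else if ((c :: rest).length : Int) < k then false
    else if c () then needCount rest (k - 1) else needCount rest k

-- Source B's _contains_indicator: position-major scan — at each position, does some indicator start there?
def containsIndicator (low : List Char) : Bool :=
  (List.range low.length).any (fun i =>
    titleIndicators.any (fun ind => PySem.Chars.startswith (low.drop i) ind.toList))

def is_title_candidate_dynamic_alt (line : String) (line_index : Int) : Bool :=
  let cs := line.toList
  if cs.length < 5 ∨ 500 < cs.length ∨ 50 < (PySem.Str.split₀ line).length then false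
  else
    needCount
      [fun _ => containsIndicator ((PySem.Str.lower line).toList),
       fun _ => startsCap cs && (!(PySem.Str.endswith line ".") &&
                  !((PySem.List.slice cs none (some 5)).any PySem.Chars.isdigit)),
       fun _ => decide (10 < cs.length) && pyStrIsupper cs,
       fun _ => decide (line_index < 10)] 2

-- ===== PRECONDITION & SPEC =====
def Spec_is_title_candidate_dynamic (line : String) (line_index : Int) (out : Bool) : Prop := out = is_title_candidate_dynamic_alt line line_index
instance (line : String) (line_index : Int) (out : Bool) : Decidable (Spec_is_title_candidate_dynamic line line_index out) := by unfold Spec_is_title_candidate_dynamic; infer_instance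

-- ===== CLAIM (what is proved, stated in full; the proofs are below) =====
def Claim_equal_is_title_candidate_dynamic : Prop := ∀ (line : String) (line_index : Int), Dom_is_title_candidate_dynamic line line_index → Spec_is_title_candidate_dynamic line line_index (is_title_candidate_dynamic line line_index)

-- ===== LEMMAS AND PROOFS =====

lemma titleIndicators_ne_nil : ∀ ind ∈ titleIndicators, ind.toList ≠ [] := by decide

-- the position-major scan finds exactly the nonempty substrings 'in' finds
lemma range_any_startswith (s sub : List Char) (h : sub ≠ []) :
    (List.range s.length).any (fun i => PySem.Chars.startswith (s.drop i) sub)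
      = PySem.Chars.isIn sub s := by
  rw [Bool.eq_iff_iff]
  simp only [List.any_eq_true, List.mem_range, PySem.Chars.startswith_iff,
    ← PySem.Chars.exists_prefix_drop_iff_isIn]
  constructor
  · rintro ⟨i, _, hp⟩; exact ⟨i, hp⟩
  · rintro ⟨j, hp⟩
    by_cases hj : j < s.length
    · exact ⟨j, hj, hp⟩
    · rw [List.drop_eq_nil_of_le (by omega)] at hp
      exact absurd (List.prefix_nil.mp hp) h

lemma contains_eq (cs : List Char) :
    containsIndicator cs = titleIndicators.any (fun ind => PySem.Chars.isIn ind.toList cs) := by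
  unfold containsIndicator
  rw [Bool.eq_iff_iff]
  simp only [List.any_eq_true, List.mem_range]
  constructor
  · rintro ⟨i, hi, ind, hm, hs⟩
    refine ⟨ind, hm, ?_⟩
    rw [← range_any_startswith cs ind.toList (titleIndicators_ne_nil ind hm)]
    simp only [List.any_eq_true, List.mem_range]
    exact ⟨i, hi, hs⟩
  · rintro ⟨ind, hm, hin⟩
    rw [← range_any_startswith cs ind.toList (titleIndicators_ne_nil ind hm)] at hin
    simp only [List.any_eq_true, List.mem_range] at hin
    obtain ⟨i, hi, hs⟩ := hin
    exact ⟨i, hi, ind, hm, hs⟩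

-- needCount on exactly four thunks asked for 2 is "some two of the four hold"
lemma needCount_four (a b c d : Bool) :
    needCount [fun _ => a, fun _ => b, fun _ => c, fun _ => d] 2
      = (a && b || a && c || a && d || b && c || b && d || c && d) := by
  cases a <;> cases b <;> cases c <;> cases d <;> rfl

-- ===== VERDICT (by name: the statement is the Claim_ definition above) =====
set_option maxHeartbeats 1000000 in
theorem is_title_candidate_dynamic_spec : Claim_equal_is_title_candidate_dynamic := by
  intro line i _
  unfold Spec_is_title_candidate_dynamic
  simp only [is_title_candidate_dynamic, is_title_candidate_dynamic_alt]
  by_cases h1 : line.toList.length < 5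
  · rw [if_pos h1, if_pos (Or.inl h1)]
  rw [if_neg h1]
  by_cases h2 : 500 < line.toList.length
  · rw [if_pos h2, if_pos (Or.inr (Or.inl h2))]
  rw [if_neg h2]
  by_cases h3 : 50 < (PySem.Str.split₀ line).length
  · rw [if_pos h3, if_pos (Or.inr (Or.inr h3))]
  rw [if_neg h3, if_neg (show ¬(line.toList.length < 5 ∨ 500 < line.toList.length ∨
        50 < (PySem.Str.split₀ line).length) by tauto)]
  rw [needCount_four, contains_eq]
  simp only [PySem.Str.toList_lower]
  have hA' : (titleIndicators.any fun ind => PySem.Str.isIn ind (PySem.Str.lower line)) =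
      titleIndicators.any fun ind => PySem.Chars.isIn ind.toList (PySem.Chars.lower line.toList) := by
    simp only [PySem.Str.isIn_eq, PySem.Str.toList_lower]
  rw [hA']
  cases hA : titleIndicators.any (fun ind => PySem.Chars.isIn ind.toList (PySem.Chars.lower line.toList)) <;>
  cases hB : startsCap line.toList &&
      (!(PySem.Str.endswith line ".") &&
        !((PySem.List.slice line.toList none (some 5)).any PySem.Chars.isdigit)) <;>
  cases hC : pyStrIsupper line.toList <;>
  cases hD : decide (10 < line.toList.length) <;>
  by_cases hi : i < 10 <;>
  simp only [hi, decide_true, decide_false, Bool.and_true, Bool.and_false, Bool.true_and,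
    Bool.false_and, Bool.or_true, Bool.or_false, Bool.true_or, Bool.false_or] <;>
  split_ifs <;> first | rfl | omega | simp_all
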